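-- pv_equiv track=rewrite | github.com/mulhoo/CommercialEnergyWaterBillAutomation | extractors/nmwd.py | _is_nmwd_bill
-- ===== SOURCE A (Python) =====
-- def _is_nmwd_bill(text: str) -> bool:
--     """Check if this is actually a North Marin bill"""
--     if not text:
--         return False
--
--     text_upper = text.upper()
--
--     strong_nmwd_indicators = [
--         "NORTH MARIN WATER DISTRICT",
--         "NORTH MARIN",
--     ]
--
--     strong_mmwd_indicators = [
--         "MARIN MUNICIPAL",
--         "220 NELLEN AVENUE",
--         "CORTE MADERA",
--         "MARINWATER.ORG"
--     ]
--
--     has_strong_nmwd = any(indicator in text_upper for indicator in strong_nmwd_indicators)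
--     has_strong_mmwd = any(indicator in text_upper for indicator in strong_mmwd_indicators)
--
--     if has_strong_nmwd and has_strong_mmwd:
--         return "NORTH MARIN" in text_upper
--
--     return has_strong_nmwd and not has_strong_mmwd
-- ===== SOURCE B (Python) =====
-- def _is_nmwd_bill(text: str) -> bool:
--     """Check if this is actually a North Marin bill"""
--     return bool(text) and "NORTH MARIN" in text.upper()
-- ===== Notes on version B (the rewrite author's own statement) =====
-- stated objective: simpler
-- what changed: Both indicator lists and the two-branch disambiguation collapse to a single substring membership test, since every path of A returns True exactly when 'NORTH MARIN' occurs in the upper-cased text.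
import Mathlib
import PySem

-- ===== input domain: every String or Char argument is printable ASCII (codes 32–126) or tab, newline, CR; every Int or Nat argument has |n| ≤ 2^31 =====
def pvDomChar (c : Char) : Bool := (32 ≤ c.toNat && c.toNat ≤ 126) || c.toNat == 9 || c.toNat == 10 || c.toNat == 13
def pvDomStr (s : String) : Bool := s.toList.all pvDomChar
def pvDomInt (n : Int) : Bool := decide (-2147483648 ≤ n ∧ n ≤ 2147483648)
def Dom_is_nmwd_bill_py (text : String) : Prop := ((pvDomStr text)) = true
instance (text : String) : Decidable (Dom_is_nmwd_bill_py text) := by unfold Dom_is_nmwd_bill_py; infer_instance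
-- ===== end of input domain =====

-- B replaces A's two indicator lists and branch disambiguation with one substring test ('NORTH MARIN' subsumes every True path); objective: simpler.


-- ===== PORT A =====
def is_nmwd_bill_py (text : String) : Bool :=
  if text == "" then false
  else
    let text_upper := PySem.Str.upper text
    let strong_nmwd_indicators : List String :=
      ["NORTH MARIN WATER DISTRICT", "NORTH MARIN"]
    let strong_mmwd_indicators : List String :=
      ["MARIN MUNICIPAL", "220 NELLEN AVENUE", "CORTE MADERA", "MARINWATER.ORG"]
    let has_strong_nmwd := strong_nmwd_indicators.any (fun ind => PySem.Str.isIn ind text_upper)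
    let has_strong_mmwd := strong_mmwd_indicators.any (fun ind => PySem.Str.isIn ind text_upper)
    if has_strong_nmwd && has_strong_mmwd then
      PySem.Str.isIn "NORTH MARIN" text_upper
    else
      has_strong_nmwd && !has_strong_mmwd

-- ===== PORT B =====
def is_nmwd_bill_py_alt (text : String) : Bool :=
  (!(text == "")) && PySem.Str.isIn "NORTH MARIN" (PySem.Str.upper text)

-- ===== PRECONDITION & SPEC =====
def Spec_is_nmwd_bill_py (text : String) (out : Bool) : Prop := out = is_nmwd_bill_py_alt text
instance (text : String) (out : Bool) : Decidable (Spec_is_nmwd_bill_py text out) := by unfold Spec_is_nmwd_bill_py; infer_instance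

-- ===== CLAIM (what is proved, stated in full; the proofs are below) =====
def Claim_equal_is_nmwd_bill_py : Prop := ∀ (text : String), Dom_is_nmwd_bill_py text → Spec_is_nmwd_bill_py text (is_nmwd_bill_py text)

-- ===== LEMMAS AND PROOFS =====

-- 'NORTH MARIN WATER DISTRICT' in u implies 'NORTH MARIN' in u (the short indicator is a prefix of the long one)
theorem nm_of_nmwd (u : String)
    (h : PySem.Str.isIn "NORTH MARIN WATER DISTRICT" u = true) :
    PySem.Str.isIn "NORTH MARIN" u = true := by
  rw [PySem.Str.isIn_iff_infix] at h ⊢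
  exact List.IsInfix.trans (by decide) h

-- ===== VERDICT (by name: the statement is the Claim_ definition above) =====
theorem is_nmwd_bill_py_spec : Claim_equal_is_nmwd_bill_py := by
  intro text _
  unfold Spec_is_nmwd_bill_py is_nmwd_bill_py is_nmwd_bill_py_alt
  by_cases he : text == ""
  · simp [he]
  · simp only [he, Bool.not_false, Bool.true_and, List.any_cons, List.any_nil,
      Bool.or_false]
    cases hl : PySem.Str.isIn "NORTH MARIN WATER DISTRICT" (PySem.Str.upper text)
    · cases hs : PySem.Str.isIn "NORTH MARIN" (PySem.Str.upper text) <;>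
        cases hm : ((PySem.Str.isIn "MARIN MUNICIPAL" (PySem.Str.upper text) ||
          (PySem.Str.isIn "220 NELLEN AVENUE" (PySem.Str.upper text) ||
          (PySem.Str.isIn "CORTE MADERA" (PySem.Str.upper text) ||
           PySem.Str.isIn "MARINWATER.ORG" (PySem.Str.upper text))))) <;>
        simp_all
    · have hs := nm_of_nmwd _ hl
      cases hm : ((PySem.Str.isIn "MARIN MUNICIPAL" (PySem.Str.upper text) ||
          (PySem.Str.isIn "220 NELLEN AVENUE" (PySem.Str.upper text) ||
          (PySem.Str.isIn "CORTE MADERA" (PySem.Str.upper text) ||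
           PySem.Str.isIn "MARINWATER.ORG" (PySem.Str.upper text))))) <;>
        simp_all
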